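-- pv_equiv track=rewrite | github.com/AndrewS-hash/pyFiddle | pyFiddle_Intermediate.py | check_number_relation
-- ===== SOURCE A (Python) =====
-- def check_number_relation(n: int) -> bool:
--     """
--     Determines if the given number is one less than twice its reverse.
--
--     Args:
--         n (int): The number to check.
--
--     Returns:
--         bool: True if the condition is met, False otherwise.
--     """
--     # Helper function to reverse the digits of a number
--     def reverse_number(num: int) -> int:
--     # Flag to handle negative numbers
--         is_negative = num < 0
--         num = abs(num)
--
--         reversed_num = 0
--
--         while num != 0:
--             # Extract the last digit and add it to the reversed number
--             reversed_num = reversed_num * 10 + num % 10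
--             num //= 10  # Remove the last digit
--
--         # Reapply the negative sign if needed
--         if is_negative:
--             reversed_num = -reversed_num
--
--         return reversed_num
--
--     # Placeholder for main logic
--     return n + 1 == 2 * reverse_number(n)
-- ===== SOURCE B (Python) =====
-- def check_number_relation(n: int) -> bool:
--     """
--     Determines if the given number is one less than twice its reverse.
--     """
--     def rev_and_scale(a: int):
--         # For a >= 0: returns (digit-reverse of a, 10 ** digit-count of a),
--         # building the reverse top-down with explicit powers of ten.
--         if a < 10:
--             return a, 10
--         r, p = rev_and_scale(a // 10)
--         return a % 10 * p + r, 10 * p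
--
--     r, _ = rev_and_scale(abs(n))
--     return n + 1 == 2 * (-r if n < 0 else r)
-- ===== Notes on version B (the rewrite author's own statement) =====
-- stated objective: alternative
-- what changed: A reverses the digits with a bottom-up tail loop maintaining a Horner accumulator (rev = rev*10 + digit); B is a top-down non-tail recursion that returns a (reverse, scale) pair and places each extracted digit at its final position via an explicit power of ten, with no accumulator and no separate zero/while handling.
import Mathlib
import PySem

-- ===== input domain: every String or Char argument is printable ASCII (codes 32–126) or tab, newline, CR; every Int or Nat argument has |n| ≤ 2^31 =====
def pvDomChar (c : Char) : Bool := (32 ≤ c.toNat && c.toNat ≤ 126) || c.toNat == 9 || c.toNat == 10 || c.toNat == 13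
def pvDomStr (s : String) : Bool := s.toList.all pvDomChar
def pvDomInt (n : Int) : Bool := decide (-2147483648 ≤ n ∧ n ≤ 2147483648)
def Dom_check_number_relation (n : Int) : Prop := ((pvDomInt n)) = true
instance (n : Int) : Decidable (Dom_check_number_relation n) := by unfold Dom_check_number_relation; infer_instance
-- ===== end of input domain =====

-- B replaces A's bottom-up accumulator loop by a top-down recursion returning a (reverse, scale) pair; alternative structure, same cost.

-- a / 10 shrinks a positive numerator (cited by the ports' decreasing_by)
theorem pv_ediv10_lt {a : Int} (ha : 0 < a) : a / 10 < a ∧ 0 ≤ a / 10 := by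
  have h := Int.ediv_add_emod a 10
  have h2 : 0 ≤ a % 10 := Int.emod_nonneg a (by norm_num)
  have h3 : a % 10 < 10 := Int.emod_lt_of_pos a (by norm_num)
  omega

-- ===== PORT A =====
-- A's `while num != 0: reversed_num = reversed_num*10 + num%10; num //= 10`.
-- The `num ≤ 0` guard only totalises the loop (A only runs it on num = abs(n) ≥ 0, where it equals `num = 0`).
def pvRevLoopA (num reversed_num : Int) : Int :=
  if h : num ≤ 0 then reversed_num
  else pvRevLoopA (PySem.Int.floordiv num 10) (reversed_num * 10 + PySem.Int.mod num 10)
termination_by num.toNat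
decreasing_by
  have h10 : PySem.Int.floordiv num 10 = num / 10 := PySem.Int.floordiv_of_nonneg (by norm_num)
  have h12 := pv_ediv10_lt (a := num) (by omega)
  rw [h10]; omega

-- A's helper reverse_number
def pvReverseNumber (num : Int) : Int :=
  let is_negative := num < 0
  let num := |num|
  let reversed_num := pvRevLoopA num 0
  if is_negative then -reversed_num else reversed_num

def check_number_relation (n : Int) : Bool :=
  n + 1 == 2 * pvReverseNumber n

-- ===== PORT B =====
-- B's rev_and_scale: top-down recursion, returns (digit-reverse of a, 10 ** digit-count of a) for a ≥ 0.
def pvRevScale (a : Int) : Int × Int :=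
  if h : a < 10 then (a, 10)
  else
    let rp := pvRevScale (PySem.Int.floordiv a 10)
    (PySem.Int.mod a 10 * rp.2 + rp.1, 10 * rp.2)
termination_by a.toNat
decreasing_by
  have h10 : PySem.Int.floordiv a 10 = a / 10 := PySem.Int.floordiv_of_nonneg (by norm_num)
  have h12 := pv_ediv10_lt (a := a) (by omega)
  rw [h10]; omega

def check_number_relation_alt (n : Int) : Bool :=
  let r := (pvRevScale |n|).1
  n + 1 == 2 * (if n < 0 then -r else r)

-- ===== PRECONDITION & SPEC =====
def Spec_check_number_relation (n : Int) (out : Bool) : Prop := out = check_number_relation_alt n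
instance (n : Int) (out : Bool) : Decidable (Spec_check_number_relation n out) := by unfold Spec_check_number_relation; infer_instance

-- ===== CLAIM (what is proved, stated in full; the proofs are below) =====
def Claim_equal_check_number_relation : Prop := ∀ (n : Int), Dom_check_number_relation n → Spec_check_number_relation n (check_number_relation n)

-- ===== LEMMAS AND PROOFS =====

-- The loop/recursion bridge: for a > 0, A's accumulator loop equals acc * scale + reverse of B's pair.
theorem pvRevLoopA_eq_scale (k : Nat) :
    ∀ (a acc : Int), a.toNat ≤ k → 0 < a →
      pvRevLoopA a acc = acc * (pvRevScale a).2 + (pvRevScale a).1 := by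
  induction k with
  | zero => intro a acc hk ha; omega
  | succ k ih =>
    intro a acc hk ha
    have hfd : PySem.Int.floordiv a 10 = a / 10 := PySem.Int.floordiv_of_nonneg (by norm_num)
    have hmd : PySem.Int.mod a 10 = a % 10 := PySem.Int.mod_of_nonneg a (by norm_num)
    rw [pvRevLoopA]
    simp only [show ¬ a ≤ 0 by omega, dite_false, hfd, hmd]
    by_cases h10 : a < 10
    · have hq : a / 10 = 0 := Int.ediv_eq_zero_of_lt (by omega) (by omega)
      have hm : a % 10 = a := Int.emod_eq_of_lt (by omega) (by omega)
      rw [hq, pvRevLoopA]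
      simp only [le_refl, dite_true]
      rw [pvRevScale]
      simp only [h10, dite_true]
      rw [hm]
    · have hq1 : 0 < a / 10 := by
        have := Int.le_ediv_iff_mul_le (show (0:Int) < 10 by norm_num) (a := a) (b := 1)
        omega
      have hq2 : (a / 10).toNat ≤ k := by
        have h12 := pv_ediv10_lt (a := a) (by omega)
        omega
      rw [ih (a / 10) (acc * 10 + a % 10) hq2 hq1]
      conv_rhs => rw [pvRevScale]
      simp only [h10, dite_false, hfd, hmd]
      ring

theorem pvRevLoopA_zero (acc : Int) : pvRevLoopA 0 acc = acc := by
  rw [pvRevLoopA]; simp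

-- ===== VERDICT (by name: the statement is the Claim_ definition above) =====
theorem check_number_relation_spec : Claim_equal_check_number_relation := by
  intro n _
  simp only [Spec_check_number_relation, check_number_relation, check_number_relation_alt,
    pvReverseNumber]
  by_cases h0 : n = 0
  · subst h0
    rw [show |(0:Int)| = 0 by simp, pvRevLoopA_zero, pvRevScale]
    norm_num
  · have habs : 0 < |n| := by positivity
    have hmain := pvRevLoopA_eq_scale (|n|).toNat |n| 0 le_rfl habs
    rw [hmain, zero_mul, zero_add]
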